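-- pv_equiv track=rewrite | github.com/yukioishi-eng/python-practice | basics/find_top_students_pythonic.py | find_top_students
-- ===== SOURCE A (Python) =====
-- def find_top_students(scores, min_score):   #引数に合格点min_scoreをとる
--     passed_students = {}
--     for name, score in scores.items():
--         if score >= min_score:
--             passed_students[name] = score
--     if not passed_students:
--         return []
--     max_score = max(passed_students.values())  #辞書のキーとバリューを知りたいときは.keys(),.value()
--
--     return [name for name, score in passed_students.items() if score == max_score]
-- ===== SOURCE B (Python) =====
-- def find_top_students(scores, min_score):
--     best = None
--     winners = []
--     for name, score in scores.items():
--         if score < min_score: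
--             continue
--         if best is None:
--             best = score
--             winners = [name]
--         elif best < score:
--             best = score
--             winners = [name]
--         elif score == best:
--             winners.append(name)
--     return winners
-- ===== Notes on version B (the rewrite author's own statement) =====
-- stated objective: alternative
-- what changed: Replaces A's three passes (build a filtered dict, take max of its values, list-comprehend the winners) by one fused pass keeping a running best score and winners list, with no intermediate dict.
import Mathlib
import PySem

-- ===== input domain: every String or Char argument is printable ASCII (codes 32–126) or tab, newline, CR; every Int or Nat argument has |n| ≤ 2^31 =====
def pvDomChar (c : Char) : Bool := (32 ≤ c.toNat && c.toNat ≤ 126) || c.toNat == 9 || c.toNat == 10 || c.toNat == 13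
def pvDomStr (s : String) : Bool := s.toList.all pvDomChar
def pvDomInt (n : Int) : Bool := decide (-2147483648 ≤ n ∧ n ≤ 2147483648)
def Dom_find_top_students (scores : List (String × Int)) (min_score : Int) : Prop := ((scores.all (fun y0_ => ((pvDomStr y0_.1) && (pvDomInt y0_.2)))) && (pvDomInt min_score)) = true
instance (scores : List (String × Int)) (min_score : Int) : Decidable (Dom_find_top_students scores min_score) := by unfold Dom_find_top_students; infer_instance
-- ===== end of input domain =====

-- B fuses A's filter/max/collect passes into one loop over scores with a running best score and winners list (alternative decomposition, same cost).


-- ===== PORT A =====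
def find_top_students (scores : List (String × Int)) (min_score : Int) : List String :=
  let passed : PySem.Dict String Int :=
    scores.foldl (fun d p => if min_score ≤ p.2 then d.insert p.1 p.2 else d) PySem.Dict.empty
  if passed.items = [] then []
  else
    match PySem.List.max? passed.values (fun v => v) with
    | none => []  -- unreachable: passed is nonempty here
    | some max_score => (passed.items.filter (fun p => p.2 == max_score)).map (·.1)

-- ===== PORT B =====
-- one loop iteration of Source B: skip failing scores; a strictly better score resets best/winners, a tie appends
def fts_step (min_score : Int) (st : Option Int × List String) (p : String × Int) : Option Int × List String :=
  if p.2 < min_score then st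
  else
    match st.1 with
    | none => (some p.2, [p.1])
    | some b =>
      if b < p.2 then (some p.2, [p.1])
      else if p.2 = b then (st.1, st.2 ++ [p.1])
      else st

def find_top_students_alt (scores : List (String × Int)) (min_score : Int) : List String :=
  (scores.foldl (fts_step min_score) (none, [])).2

-- ===== PRECONDITION & SPEC =====
-- scores is a Python dict, whose keys are necessarily distinct; Pre_ only excludes association
-- lists with duplicate names, which do not represent any dict input.
def Pre_find_top_students (scores : List (String × Int)) (min_score : Int) : Prop :=
  (scores.map Prod.fst).Nodup
instance (scores : List (String × Int)) (min_score : Int) : Decidable (Pre_find_top_students scores min_score) := by unfold Pre_find_top_students; infer_instance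
def pvWitness_find_top_students : (List (String × Int)) × Int := ([("ann", 80), ("bob", 95), ("cat", 95)], 60)
def Spec_find_top_students (scores : List (String × Int)) (min_score : Int) (out : List String) : Prop := out = find_top_students_alt scores min_score
instance (scores : List (String × Int)) (min_score : Int) (out : List String) : Decidable (Spec_find_top_students scores min_score out) := by unfold Spec_find_top_students; infer_instance

-- ===== CLAIM (what is proved, stated in full; the proofs are below) =====
def Claim_equal_find_top_students : Prop := ∀ (scores : List (String × Int)) (min_score : Int), Dom_find_top_students scores min_score → Pre_find_top_students scores min_score → Spec_find_top_students scores min_score (find_top_students scores min_score)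

-- ===== LEMMAS AND PROOFS =====

-- the post-filter body of fts_step
def fts_step0 (st : Option Int × List String) (p : String × Int) : Option Int × List String :=
  match st.1 with
  | none => (some p.2, [p.1])
  | some b =>
    if b < p.2 then (some p.2, [p.1])
    else if p.2 = b then (st.1, st.2 ++ [p.1])
    else st

lemma fts_step_eq (min_score : Int) (st : Option Int × List String) (p : String × Int) :
    fts_step min_score st p = if min_score ≤ p.2 then fts_step0 st p else st := by
  unfold fts_step fts_step0
  by_cases h : min_score ≤ p.2
  · rw [if_pos h, if_neg (by omega)]
  · rw [if_neg h, if_pos (by omega)]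

lemma max?_id_append_singleton (xs : List Int) (y : Int) :
    PySem.List.max? (xs ++ [y]) (fun v => v) =
      some (match PySem.List.max? xs (fun v => v) with | none => y | some m => max m y) := by
  cases xs with
  | nil => simp [PySem.List.max?]
  | cons w t =>
    rw [List.cons_append, PySem.List.max?_id_cons, PySem.List.max?_id_cons, List.foldl_append]
    simp

lemma fold_char (l : List (String × Int)) :
    l.foldl fts_step0 (none, ([] : List String)) =
      (PySem.List.max? (l.map (·.2)) (fun v => v),
       match PySem.List.max? (l.map (·.2)) (fun v => v) with
       | none => []
       | some m => (l.filter (fun p => p.2 == m)).map (·.1)) := by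
  induction l using List.reverseRecOn with
  | nil => simp [PySem.List.max?]
  | append_singleton l p ih =>
    rw [List.foldl_append, List.foldl_cons, List.foldl_nil, ih, List.map_append]
    simp only [List.map_cons, List.map_nil]
    rw [max?_id_append_singleton]
    cases hmx : PySem.List.max? (l.map (·.2)) (fun v => v) with
    | none =>
      have hl : l = [] := by
        have := (PySem.List.max?_eq_none_iff _ _).mp hmx
        simpa using this
      subst hl
      simp [fts_step0]
    | some M =>
      have hmax : ∀ q ∈ l, q.2 ≤ M := by
        intro q hq
        exact PySem.List.max?_isMax hmx _ (List.mem_map_of_mem hq)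
      by_cases h1 : M < p.2
      · have hm' : max M p.2 = p.2 := by omega
        have hfilt : l.filter (fun q => q.2 == p.2) = [] := by
          rw [List.filter_eq_nil_iff]
          intro q hq
          have := hmax q hq
          simp only [beq_iff_eq]
          omega
        simp [fts_step0, h1, hm', hfilt]
      · by_cases h2 : p.2 = M
        · have hm' : max M p.2 = M := by omega
          simp [fts_step0, h2]
        · have hm' : max M p.2 = M := by omega
          have hne : ¬ (p.2 == M) = true := by simp [h2]
          simp [fts_step0, h1, h2, hm', hne]

lemma passed_items (scores : List (String × Int)) (min_score : Int)
    (hn : (scores.map Prod.fst).Nodup) :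
    (scores.foldl (fun d p => if min_score ≤ p.2 then d.insert p.1 p.2 else d)
        (PySem.Dict.empty : PySem.Dict String Int)).items =
      scores.filter (fun p => decide (min_score ≤ p.2)) := by
  rw [PySem.List.foldl_ite_eq_foldl_filter]
  have hsub : (scores.filter (fun p => decide (min_score ≤ p.2))).Sublist scores :=
    List.filter_sublist
  have hnd : ((scores.filter (fun p => decide (min_score ≤ p.2))).map Prod.fst).Nodup :=
    List.Nodup.sublist (List.Sublist.map Prod.fst hsub) hn
  have h := PySem.Dict.items_foldl_insert_fresh
      (l := scores.filter (fun p => decide (min_score ≤ p.2))) (k := Prod.fst) (v := Prod.snd)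
      (d := (PySem.Dict.empty : PySem.Dict String Int))
      (by intro a _; exact PySem.Dict.contains_empty _) hnd
  simpa using h

lemma alt_eq_fold_filtered (scores : List (String × Int)) (min_score : Int) :
    find_top_students_alt scores min_score =
      ((scores.filter (fun p => decide (min_score ≤ p.2))).foldl fts_step0 (none, [])).2 := by
  unfold find_top_students_alt
  rw [show fts_step min_score = (fun st p => if min_score ≤ p.2 then fts_step0 st p else st) from
      funext fun st => funext fun p => fts_step_eq min_score st p,
    PySem.List.foldl_ite_eq_foldl_filter]

-- ===== VERDICT (by name: the statement is the Claim_ definition above) =====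
theorem find_top_students_spec : Claim_equal_find_top_students := by
  intro scores min_score _ hpre
  unfold Spec_find_top_students
  rw [alt_eq_fold_filtered, fold_char]
  simp only [find_top_students, PySem.Dict.values]
  rw [passed_items scores min_score hpre]
  cases hmx : PySem.List.max?
      ((scores.filter (fun p => decide (min_score ≤ p.2))).map (·.2)) (fun v => v) with
  | none =>
    have hnil : scores.filter (fun p => decide (min_score ≤ p.2)) = [] := by
      have := (PySem.List.max?_eq_none_iff _ _).mp hmx
      simpa using this
    simp [hnil]
  | some M =>
    have hnil : ¬ scores.filter (fun p => decide (min_score ≤ p.2)) = [] := by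
      intro h
      rw [h] at hmx
      simp [PySem.List.max?] at hmx
    simp [hnil]
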